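-- pv_equiv track=rewrite | github.com/memimy2015/automas | resources/tools/skill_tool.py | _fold_block_scalar
-- ===== SOURCE A (Python) =====
-- from typing import Dict, List, Optional, Tuple
--
-- def _fold_block_scalar(lines: List[str]) -> str:
--     out: List[str] = []
--     buf: List[str] = []
--     for line in lines:
--         if line.strip() == "":
--             if buf:
--                 out.append(" ".join(buf).strip())
--                 buf = []
--             out.append("")
--         else:
--             buf.append(line.strip())
--     if buf:
--         out.append(" ".join(buf).strip())
--     return "\n".join(out).strip()
-- ===== SOURCE B (Python) =====
-- from typing import List
--
-- def _fold_block_scalar(lines: List[str]) -> str: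
--     stripped = [l.strip() for l in lines]
--     out: List[str] = []
--     i, n = 0, len(stripped)
--     while i < n:
--         if stripped[i] == "":
--             out.append("")
--             i += 1
--         else:
--             j = i
--             while j < n and stripped[j] != "":
--                 j += 1
--             out.append(" ".join(stripped[i:j]))
--             i = j
--     return "\n".join(out).strip()
-- ===== Notes on version B (the rewrite author's own statement) =====
-- stated objective: alternative
-- what changed: Replaces the streaming buffer-flush accumulator with a two-phase structure: strip all lines once, then scan runs of non-blank lines with an inner pointer, emitting one joined paragraph per run and one empty entry per blank line.
import Mathlib
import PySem

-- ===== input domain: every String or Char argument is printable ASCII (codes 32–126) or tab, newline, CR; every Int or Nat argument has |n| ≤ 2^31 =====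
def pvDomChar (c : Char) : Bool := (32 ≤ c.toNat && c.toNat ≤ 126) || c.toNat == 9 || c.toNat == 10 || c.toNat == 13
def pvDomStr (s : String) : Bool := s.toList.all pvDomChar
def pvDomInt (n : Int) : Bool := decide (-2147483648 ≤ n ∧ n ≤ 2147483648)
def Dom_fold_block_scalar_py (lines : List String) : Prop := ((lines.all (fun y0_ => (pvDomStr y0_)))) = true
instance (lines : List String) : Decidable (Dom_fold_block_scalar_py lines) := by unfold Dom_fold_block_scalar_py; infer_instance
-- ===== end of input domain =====

-- B replaces A's streaming buffer-flush accumulator with a two-phase run scan (strip all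
-- lines once, then emit one joined paragraph per non-blank run and one "" per blank line);
-- same cost, alternative structure.

-- ===== PORT A =====
def fold_block_scalar_py (lines : List String) : String :=
  let st := lines.foldl
    (fun (st : List String × List String) (line : String) =>
      if PySem.Str.strip line = "" then
        ((if st.2 ≠ [] then st.1 ++ [PySem.Str.strip (PySem.Str.join " " st.2)] else st.1)
          ++ [""], [])
      else
        (st.1, st.2 ++ [PySem.Str.strip line]))
    ([], [])
  let out := if st.2 ≠ [] then st.1 ++ [PySem.Str.strip (PySem.Str.join " " st.2)] else st.1
  PySem.Str.strip (PySem.Str.join "\n" out)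

-- ===== PORT B =====
-- the outer while-loop of Source B: one "" per blank line; for a non-blank line, the inner
-- while-loop scans to the end of the run (takeWhile/dropWhile) and emits one joined paragraph
def pvBRuns : List String → List String
  | [] => []
  | x :: t =>
    if x = "" then "" :: pvBRuns t
    else
      PySem.Str.join " " (x :: t.takeWhile (· ≠ "")) :: pvBRuns (t.dropWhile (· ≠ ""))
termination_by l => l.length
decreasing_by
  · simp
  · exact Nat.lt_of_le_of_lt (List.length_dropWhile_le _ _) (by simp)

def fold_block_scalar_py_alt (lines : List String) : String :=
  PySem.Str.strip (PySem.Str.join "\n" (pvBRuns (lines.map PySem.Str.strip)))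

-- ===== PRECONDITION & SPEC =====
def Spec_fold_block_scalar_py (lines : List String) (out : String) : Prop := out = fold_block_scalar_py_alt lines
instance (lines : List String) (out : String) : Decidable (Spec_fold_block_scalar_py lines out) := by unfold Spec_fold_block_scalar_py; infer_instance

-- ===== CLAIM (what is proved, stated in full; the proofs are below) =====
def Claim_equal_fold_block_scalar_py : Prop := ∀ (lines : List String), Dom_fold_block_scalar_py lines → Spec_fold_block_scalar_py lines (fold_block_scalar_py lines)

-- ===== LEMMAS AND PROOFS =====

-- A's loop body, already fed the stripped line (A strips the same line in both uses)
def pvStepA (st : List String × List String) (x : String) : List String × List String :=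
  if x = "" then
    ((if st.2 ≠ [] then st.1 ++ [PySem.Str.strip (PySem.Str.join " " st.2)] else st.1) ++ [""], [])
  else
    (st.1, st.2 ++ [x])

-- A's end-of-input flush
def pvFlushA (buf : List String) : List String :=
  if buf ≠ [] then [PySem.Str.strip (PySem.Str.join " " buf)] else []

-- A's loop rephrased with an explicit pending buffer
def pvARun : List String → List String → List String
  | buf, [] => pvFlushA buf
  | buf, x :: t => if x = "" then pvFlushA buf ++ "" :: pvARun [] t else pvARun (buf ++ [x]) t

-- a string whose char list is untouched by lstrip and by rstrip
def pvGs (s : String) : Prop :=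
  s.toList.dropWhile PySem.Chars.isspace = s.toList ∧
  s.toList.reverse.dropWhile PySem.Chars.isspace = s.toList.reverse

theorem pvBRuns_nil : pvBRuns [] = [] := by
  rw [pvBRuns]

theorem pvBRuns_blank (t : List String) : pvBRuns ("" :: t) = "" :: pvBRuns t := by
  rw [pvBRuns]
  simp

theorem pvBRuns_cons (x : String) (t : List String) (hx : x ≠ "") :
    pvBRuns (x :: t) =
      PySem.Str.join " " (x :: t.takeWhile (· ≠ "")) :: pvBRuns (t.dropWhile (· ≠ "")) := by
  rw [pvBRuns]
  simp [hx]

theorem pv_dropWhile_cons (p : Char → Bool) (x : Char) (xs : List Char) :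
    List.dropWhile p (x :: xs) = if p x then List.dropWhile p xs else x :: xs := by
  cases h : p x <;> simp [List.dropWhile, h]

theorem pv_head_false {p : Char → Bool} {x : Char} {xs : List Char}
    (h : List.dropWhile p (x :: xs) = x :: xs) : p x = false := by
  by_contra hb
  have hp : p x = true := by revert hb; cases p x <;> simp
  rw [pv_dropWhile_cons, hp, if_pos rfl] at h
  have := List.length_dropWhile_le p xs
  rw [h] at this
  simp at this

theorem pv_dropWhile_append_fix {p : Char → Bool} {X : List Char} (Y : List Char)
    (hfix : List.dropWhile p X = X) (hne : X ≠ []) :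
    List.dropWhile p (X ++ Y) = X ++ Y := by
  cases X with
  | nil => exact absurd rfl hne
  | cons x xs =>
    have hx := pv_head_false hfix
    rw [List.cons_append, pv_dropWhile_cons, hx]
    simp

theorem pv_dropWhile_idem (p : Char → Bool) (l : List Char) :
    List.dropWhile p (List.dropWhile p l) = List.dropWhile p l := by
  induction l with
  | nil => simp
  | cons a l ih =>
    rw [pv_dropWhile_cons]
    cases h : p a
    · simp [h]
    · simpa using ih

theorem pv_Gs_strip (s : String) : pvGs (PySem.Str.strip s) := by
  unfold pvGs
  rw [PySem.Str.toList_strip]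
  simp only [PySem.Chars.strip, PySem.Chars.rstrip, PySem.Chars.lstrip]
  constructor
  · -- lstrip leaves rstrip (lstrip …) unchanged
    generalize hz : List.dropWhile PySem.Chars.isspace s.toList = z
    have hzfix : List.dropWhile PySem.Chars.isspace z = z := by
      rw [← hz]
      exact pv_dropWhile_idem _ _
    obtain ⟨r, hr⟩ : (List.dropWhile PySem.Chars.isspace z.reverse).reverse <+: z := by
      obtain ⟨u, hu⟩ := List.dropWhile_suffix (l := z.reverse) PySem.Chars.isspace
      exact ⟨u.reverse, by rw [← List.reverse_append, hu, List.reverse_reverse]⟩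
    cases hW : (List.dropWhile PySem.Chars.isspace z.reverse).reverse with
    | nil => simp
    | cons w ws =>
      rw [hW] at hr
      rw [← hr] at hzfix
      simp only [List.cons_append] at hzfix
      have hw := pv_head_false hzfix
      rw [pv_dropWhile_cons, hw]
      simp
  · -- rstrip's result reversed is a dropWhile fixpoint
    rw [List.reverse_reverse]
    exact pv_dropWhile_idem _ _

theorem pv_join_ne_nil (c : List Char) (rest : List (List Char)) (hc : c ≠ []) :
    PySem.Chars.join [' '] (c :: rest) ≠ [] := by
  cases rest with
  | nil => rw [PySem.Chars.join_singleton]; exact hc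
  | cons d rest' =>
    rw [PySem.Chars.join_cons_cons]
    simp [hc]

theorem pv_join_dropWhile_fix (parts : List (List Char))
    (hne : parts ≠ [])
    (h : ∀ b ∈ parts, b ≠ [] ∧ List.dropWhile PySem.Chars.isspace b = b) :
    List.dropWhile PySem.Chars.isspace (PySem.Chars.join [' '] parts)
      = PySem.Chars.join [' '] parts := by
  cases parts with
  | nil => exact absurd rfl hne
  | cons b rest =>
    obtain ⟨hb, hbfix⟩ := h b (by simp)
    cases rest with
    | nil => rw [PySem.Chars.join_singleton]; exact hbfix
    | cons c rest' =>
      rw [PySem.Chars.join_cons_cons, List.append_assoc]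
      exact pv_dropWhile_append_fix _ hbfix hb

theorem pv_join_rev_dropWhile_fix (parts : List (List Char))
    (hne : parts ≠ [])
    (h : ∀ b ∈ parts, b ≠ [] ∧ List.dropWhile PySem.Chars.isspace b.reverse = b.reverse) :
    List.dropWhile PySem.Chars.isspace (PySem.Chars.join [' '] parts).reverse
      = (PySem.Chars.join [' '] parts).reverse := by
  induction parts with
  | nil => exact absurd rfl hne
  | cons b rest ih =>
    obtain ⟨hb, hbfix⟩ := h b (by simp)
    cases rest with
    | nil => rw [PySem.Chars.join_singleton]; exact hbfix
    | cons c rest' =>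
      rw [PySem.Chars.join_cons_cons]
      have hc : c ≠ [] := (h c (by simp)).1
      have hJ := ih (by simp) (fun x hx => h x (List.mem_cons_of_mem _ hx))
      have hJne : (PySem.Chars.join [' '] (c :: rest')).reverse ≠ [] := by
        simpa using pv_join_ne_nil c rest' hc
      have := pv_dropWhile_append_fix (Y := (b ++ [' ']).reverse) hJ hJne
      rw [← List.reverse_append] at this
      simpa [List.append_assoc] using this

-- strip is a no-op on " ".join(buf) when every buf element is nonempty and already stripped
theorem pv_strip_join (buf : List String) (hne : buf ≠ [])
    (h : ∀ b ∈ buf, b ≠ "" ∧ pvGs b) :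
    PySem.Str.strip (PySem.Str.join " " buf) = PySem.Str.join " " buf := by
  rw [← String.toList_inj, PySem.Str.toList_strip, PySem.Str.toList_join]
  have hsep : (" " : String).toList = [' '] := rfl
  rw [hsep]
  have hparts : ∀ b ∈ buf.map String.toList,
      b ≠ [] ∧ List.dropWhile PySem.Chars.isspace b = b ∧
        List.dropWhile PySem.Chars.isspace b.reverse = b.reverse := by
    intro b hb
    obtain ⟨s, hs, rfl⟩ := List.mem_map.mp hb
    obtain ⟨hsne, hg1, hg2⟩ := h s hs
    refine ⟨?_, hg1, hg2⟩
    intro hnil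
    exact hsne (String.toList_inj.mp (by simp [hnil]))
  have hpne : buf.map String.toList ≠ [] := by simpa using hne
  simp only [PySem.Chars.strip, PySem.Chars.lstrip, PySem.Chars.rstrip]
  rw [pv_join_dropWhile_fix _ hpne (fun b hb => ⟨(hparts b hb).1, (hparts b hb).2.1⟩)]
  rw [pv_join_rev_dropWhile_fix _ hpne (fun b hb => ⟨(hparts b hb).1, (hparts b hb).2.2⟩)]
  exact List.reverse_reverse _

-- pvBRuns absorbs its own head-run decomposition
theorem pv_bRuns_span (t : List String) :
    (if t.takeWhile (· ≠ "") = [] then []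
      else [PySem.Str.join " " (t.takeWhile (· ≠ ""))]) ++ pvBRuns (t.dropWhile (· ≠ ""))
    = pvBRuns t := by
  cases t with
  | nil => simp [pvBRuns_nil]
  | cons x t' =>
    by_cases hx : x = ""
    · subst hx
      simp [pvBRuns_blank]
    · rw [List.takeWhile_cons_of_pos (by simp [hx]), List.dropWhile_cons_of_pos (by simp [hx]),
        pvBRuns_cons x t' hx]
      simp

-- A's buffered loop equals B's run decomposition, given a pending stripped buffer
theorem pv_aRun_eq (ls : List String) : ∀ buf : List String,
    (∀ b ∈ buf, b ≠ "" ∧ pvGs b) → (∀ s ∈ ls, pvGs s) →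
    pvARun buf ls =
      (if buf ++ ls.takeWhile (· ≠ "") = [] then []
        else [PySem.Str.join " " (buf ++ ls.takeWhile (· ≠ ""))]) ++
        pvBRuns (ls.dropWhile (· ≠ "")) := by
  induction ls with
  | nil =>
    intro buf hbuf _
    simp only [List.takeWhile_nil, List.dropWhile_nil, List.append_nil, pvBRuns_nil]
    rw [pvARun, pvFlushA]
    by_cases hb : buf = []
    · simp [hb]
    · rw [if_pos hb, pv_strip_join buf hb hbuf]
      simp [hb]
  | cons x t ih =>
    intro buf hbuf hls
    by_cases hx : x = ""
    · subst hx
      rw [pvARun, if_pos rfl]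
      rw [List.takeWhile_cons_of_neg (by simp), List.dropWhile_cons_of_neg (by simp)]
      have ht := ih [] (by simp) (fun s hs => hls s (List.mem_cons_of_mem _ hs))
      simp only [List.nil_append] at ht
      rw [ht, pv_bRuns_span, pvFlushA]
      by_cases hb : buf = []
      · simp [hb, pvBRuns_blank]
      · rw [if_pos hb, pv_strip_join buf hb hbuf]
        simp [hb, pvBRuns_blank]
    · rw [pvARun, if_neg hx]
      rw [List.takeWhile_cons_of_pos (by simp [hx]), List.dropWhile_cons_of_pos (by simp [hx])]
      have hbuf' : ∀ b ∈ buf ++ [x], b ≠ "" ∧ pvGs b := by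
        intro b hb
        rcases List.mem_append.mp hb with hb | hb
        · exact hbuf b hb
        · rw [List.mem_singleton] at hb
          subst hb
          exact ⟨hx, hls b (by simp)⟩
      have ht := ih (buf ++ [x]) hbuf' (fun s hs => hls s (List.mem_cons_of_mem _ hs))
      rw [ht]
      simp [List.append_assoc]

-- A's foldl with trailing flush equals pvARun
theorem pv_fold_eq_aRun (ls : List String) : ∀ out buf : List String,
    (let st := List.foldl pvStepA (out, buf) ls
      if st.2 ≠ [] then st.1 ++ [PySem.Str.strip (PySem.Str.join " " st.2)] else st.1)
    = out ++ pvARun buf ls := by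
  induction ls with
  | nil =>
    intro out buf
    rw [pvARun, pvFlushA]
    by_cases hb : buf = [] <;> simp [hb]
  | cons x t ih =>
    intro out buf
    by_cases hx : x = ""
    · subst hx
      rw [pvARun, if_pos rfl]
      have hstep : pvStepA (out, buf) "" =
          ((if buf ≠ [] then out ++ [PySem.Str.strip (PySem.Str.join " " buf)] else out) ++ [""], []) := by
        simp [pvStepA]
      rw [List.foldl_cons, hstep, ih, pvFlushA]
      by_cases hb : buf = [] <;> simp [hb]
    · rw [pvARun, if_neg hx]
      have hstep : pvStepA (out, buf) x = (out, buf ++ [x]) := by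
        simp [pvStepA, hx]
      rw [List.foldl_cons, hstep, ih]

-- ===== VERDICT (by name: the statement is the Claim_ definition above) =====
theorem fold_block_scalar_py_spec : Claim_equal_fold_block_scalar_py := by
  intro lines _
  unfold Spec_fold_block_scalar_py fold_block_scalar_py fold_block_scalar_py_alt
  have hfold : lines.foldl
      (fun (st : List String × List String) (line : String) =>
        if PySem.Str.strip line = "" then
          ((if st.2 ≠ [] then st.1 ++ [PySem.Str.strip (PySem.Str.join " " st.2)] else st.1)
            ++ [""], [])
        else
          (st.1, st.2 ++ [PySem.Str.strip line]))
      ([], [])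
    = (lines.map PySem.Str.strip).foldl pvStepA ([], []) := by
    rw [List.foldl_map]
    rfl
  simp only [hfold]
  have h1 := pv_fold_eq_aRun (lines.map PySem.Str.strip) [] []
  simp only [List.nil_append] at h1
  rw [h1]
  have h2 := pv_aRun_eq (lines.map PySem.Str.strip) [] (by simp)
    (by intro s hs; obtain ⟨l, _, rfl⟩ := List.mem_map.mp hs; exact pv_Gs_strip l)
  simp only [List.nil_append] at h2
  rw [h2, pv_bRuns_span]
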